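-- pv_equiv track=rewrite | github.com/krishnu8/Python | Lab-7/3.py | find_min_max_salary
-- ===== SOURCE A (Python) =====
-- def find_min_max_salary(employee_dict):
--     dept_min_max = {}
--
--     for dept_name, employees in employee_dict.items():
--         salaries = list(employees.values())
--         min_salary = min(salaries)
--         max_salary = max(salaries)
--         dept_min_max[dept_name] = {"Min Salary": min_salary, "Max Salary": max_salary}
--
--     return dept_min_max
-- ===== SOURCE B (Python) =====
-- def find_min_max_salary(employee_dict):
--     return {
--         dept: {"Min Salary": s[0], "Max Salary": s[-1]}
--         for dept, s in ((d, sorted(e.values())) for d, e in employee_dict.items())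
--     }
-- ===== Notes on version B (the rewrite author's own statement) =====
-- stated objective: alternative
-- what changed: A scans each department's salaries twice with min() and max() inside an insertion loop; B is a dict comprehension that sorts each department's salary list once and takes its first and last element.
import Mathlib
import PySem

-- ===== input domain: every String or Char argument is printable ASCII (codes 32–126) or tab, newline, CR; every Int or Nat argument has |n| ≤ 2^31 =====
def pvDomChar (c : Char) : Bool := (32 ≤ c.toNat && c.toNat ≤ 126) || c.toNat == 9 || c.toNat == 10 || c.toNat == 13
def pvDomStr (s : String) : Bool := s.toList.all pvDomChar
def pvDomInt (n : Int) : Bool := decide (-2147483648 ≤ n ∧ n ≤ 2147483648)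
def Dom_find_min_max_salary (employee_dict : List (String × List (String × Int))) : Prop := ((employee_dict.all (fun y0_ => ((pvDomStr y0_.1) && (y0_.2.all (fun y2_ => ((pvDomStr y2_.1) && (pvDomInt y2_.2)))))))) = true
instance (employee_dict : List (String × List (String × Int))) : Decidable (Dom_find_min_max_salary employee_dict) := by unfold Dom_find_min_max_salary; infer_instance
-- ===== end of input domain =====

-- B replaces A's insertion loop with two min()/max() scans per department by a dict
-- comprehension that sorts each department's salaries once and takes the first and
-- last element; equal return values on Pre_.

-- ===== PORT A =====
def find_min_max_salary (employee_dict : List (String × List (String × Int))) : List (String × List (String × Int)) :=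
  (employee_dict.foldl
    (fun dept_min_max p =>
      let salaries := p.2.map Prod.snd
      -- min()/max() raise ValueError on an empty list: excluded by Pre_, getD 0 never read there
      let min_salary := (PySem.List.min? salaries (fun y => y)).getD 0
      let max_salary := (PySem.List.max? salaries (fun y => y)).getD 0
      dept_min_max.insert p.1 [("Min Salary", min_salary), ("Max Salary", max_salary)])
    PySem.Dict.empty).items

-- ===== PORT B =====
def pvDeptMM (employees : List (String × Int)) : List (String × Int) :=
  let s := PySem.List.sorted (employees.map Prod.snd) (fun y => y) false
  -- s[0] / s[-1] raise IndexError on an empty department dict: excluded by Pre_, getD 0 never read there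
  [("Min Salary", (PySem.List.pyGet? s 0).getD 0),
   ("Max Salary", (PySem.List.pyGet? s (-1)).getD 0)]

def find_min_max_salary_alt (employee_dict : List (String × List (String × Int))) : List (String × List (String × Int)) :=
  employee_dict.map (fun p => (p.1, pvDeptMM p.2))

-- ===== PRECONDITION & SPEC =====
-- Pre_ excludes departments with no employees, on which A raises ValueError (min() of an empty
-- sequence), and association lists with duplicate department or employee names, which a Python
-- dict argument cannot represent (their collapse order is an artefact of the encoding).
def Pre_find_min_max_salary (employee_dict : List (String × List (String × Int))) : Prop :=
  (employee_dict.map Prod.fst).Nodup ∧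
  ∀ p ∈ employee_dict, p.2 ≠ [] ∧ (p.2.map Prod.fst).Nodup
instance (employee_dict : List (String × List (String × Int))) : Decidable (Pre_find_min_max_salary employee_dict) := by unfold Pre_find_min_max_salary; infer_instance

def pvWitness_find_min_max_salary : (List (String × List (String × Int))) :=
  [("Sales", [("ann", 30), ("bob", 25)]), ("IT", [("cy", 40)])]

def Spec_find_min_max_salary (employee_dict : List (String × List (String × Int))) (out : List (String × List (String × Int))) : Prop := out = find_min_max_salary_alt employee_dict
instance (employee_dict : List (String × List (String × Int))) (out : List (String × List (String × Int))) : Decidable (Spec_find_min_max_salary employee_dict out) := by unfold Spec_find_min_max_salary; infer_instance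

-- ===== CLAIM (what is proved, stated in full; the proofs are below) =====
def Claim_equal_find_min_max_salary : Prop := ∀ (employee_dict : List (String × List (String × Int))), Dom_find_min_max_salary employee_dict → Pre_find_min_max_salary employee_dict → Spec_find_min_max_salary employee_dict (find_min_max_salary employee_dict)

-- ===== LEMMAS AND PROOFS =====

-- head of the sorted list is min(l)
theorem pvSortedHead (l : List Int) (h : l ≠ []) :
    (PySem.List.pyGet? (PySem.List.sorted l (fun y => y) false) 0).getD 0
      = (PySem.List.min? l (fun y => y)).getD 0 := by
  obtain ⟨m, t, hs⟩ := List.exists_cons_of_ne_nil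
    ((not_iff_not.mpr (PySem.List.sorted_eq_nil_iff (xs := l) (key := fun y => y) (rev := false))).mpr h)
  obtain ⟨m', hm'⟩ := Option.ne_none_iff_exists'.mp
    ((not_iff_not.mpr (PySem.List.min?_eq_none_iff (xs := l) (key := fun y => y))).mpr h)
  rw [hs, PySem.List.pyGet?_zero_cons, hm']
  have hmem : m ∈ l := (PySem.List.mem_sorted _ _ _ _).mp (hs ▸ List.mem_cons_self)
  have h1 : m' ≤ m := PySem.List.min?_isMin hm' m hmem
  have h2 : m ≤ m' := PySem.List.key_head_sorted_le l (fun y => y) hs m' (PySem.List.min?_mem hm')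
  simp only [Option.getD_some]
  exact le_antisymm h2 h1

-- last of the sorted list is max(l)
theorem pvSortedLast (l : List Int) (h : l ≠ []) :
    (PySem.List.pyGet? (PySem.List.sorted l (fun y => y) false) (-1)).getD 0
      = (PySem.List.max? l (fun y => y)).getD 0 := by
  have hs : PySem.List.sorted l (fun y => y) false ≠ [] :=
    (not_iff_not.mpr (PySem.List.sorted_eq_nil_iff (xs := l) (key := fun y => y) (rev := false))).mpr h
  obtain ⟨M, hM⟩ := Option.ne_none_iff_exists'.mp
    ((not_iff_not.mpr (PySem.List.max?_eq_none_iff (xs := l) (key := fun y => y))).mpr h)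
  rcases (List.eq_nil_or_concat (PySem.List.sorted l (fun y => y) false)) with hnil | ⟨t, a, hta⟩
  · exact absurd hnil hs
  rw [List.concat_eq_append] at hta
  rw [hta, PySem.List.pyGet?_neg_one_append_singleton, hM]
  have hmem : a ∈ l := (PySem.List.mem_sorted _ _ _ _).mp (hta ▸ List.mem_append.mpr (Or.inr (List.mem_singleton_self _)))
  have h1 : a ≤ M := PySem.List.max?_isMax hM a hmem
  have hpw : (t ++ [a]).Pairwise (fun x y : Int => x ≤ y) := by
    have := PySem.List.sorted_pairwise l (fun y : Int => y)
    rwa [hta] at this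
  have h2 : M ≤ a := by
    have hMs : M ∈ t ++ [a] := hta ▸ (PySem.List.mem_sorted _ _ _ _).mpr (PySem.List.max?_mem hM)
    rcases List.mem_append.mp hMs with hMt | hMa
    · exact (List.pairwise_append.mp hpw).2.2 M hMt a (List.mem_singleton_self _)
    · exact le_of_eq (List.mem_singleton.mp hMa)
  simp [le_antisymm h1 h2]

-- per-department agreement on a nonempty value list
theorem pvSummaryAgree (employees : List (String × Int)) (h : employees ≠ []) :
    [("Min Salary", (PySem.List.min? (employees.map Prod.snd) (fun y => y)).getD 0),
     ("Max Salary", (PySem.List.max? (employees.map Prod.snd) (fun y => y)).getD 0)]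
      = pvDeptMM employees := by
  have h' : employees.map Prod.snd ≠ [] := by simpa using h
  show _ = [("Min Salary", (PySem.List.pyGet? (PySem.List.sorted (employees.map Prod.snd) (fun y => y) false) 0).getD 0),
            ("Max Salary", (PySem.List.pyGet? (PySem.List.sorted (employees.map Prod.snd) (fun y => y) false) (-1)).getD 0)]
  rw [pvSortedHead _ h', pvSortedLast _ h']

-- ===== VERDICT (by name: the statement is the Claim_ definition above) =====
theorem find_min_max_salary_spec : Claim_equal_find_min_max_salary := by
  intro d _ hpre
  unfold Spec_find_min_max_salary find_min_max_salary find_min_max_salary_alt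
  have hstep :
      (d.foldl
        (fun dept_min_max p =>
          let salaries := p.2.map Prod.snd
          let min_salary := (PySem.List.min? salaries (fun y => y)).getD 0
          let max_salary := (PySem.List.max? salaries (fun y => y)).getD 0
          dept_min_max.insert p.1 [("Min Salary", min_salary), ("Max Salary", max_salary)])
        PySem.Dict.empty).items
      = (PySem.Dict.empty : PySem.Dict String (List (String × Int))).items ++
          d.map (fun p => (p.1,
            [("Min Salary", (PySem.List.min? (p.2.map Prod.snd) (fun y => y)).getD 0),
             ("Max Salary", (PySem.List.max? (p.2.map Prod.snd) (fun y => y)).getD 0)])) :=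
    PySem.Dict.items_foldl_insert_fresh d (fun p => p.1)
      (fun p =>
        [("Min Salary", (PySem.List.min? (p.2.map Prod.snd) (fun y => y)).getD 0),
         ("Max Salary", (PySem.List.max? (p.2.map Prod.snd) (fun y => y)).getD 0)])
      PySem.Dict.empty (fun a _ => PySem.Dict.contains_empty _) hpre.1
  rw [hstep]
  simp only [PySem.Dict.empty, List.nil_append]
  exact List.map_congr_left (fun p hp => by
    rw [pvSummaryAgree p.2 (hpre.2 p hp).1])
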